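-- pv_equiv track=rewrite | github.com/FEIPNG/kernel_data_challenge | library_for_submissions.py | compute_feature_vector
-- ===== SOURCE A (Python) =====
-- from collections import defaultdict
--
-- def generate_mismatch_neighbors(kmer, m, alphabet = "ACGT"):
--     """
--     Generate all possible k-mers that are within 'm' mismatches of the given k-mer.
--
--     Args:
--         kmer (str): The original k-mer.
--         m (int): Maximum allowed mismatches.
--         alphabet (str): Possible characters in the k-mers (e.g., "ACGT").
--
--     Returns:
--         set: A set of k-mers within m mismatches.
--     """
--     if m == 0:
--         return {kmer}  # No mismatches allowed, return the k-mer itself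
--
--     n = len(kmer)
--     mismatch_neighbors = set()
--
--     # Generate all possible positions and substitutions up to m mismatches
--     def generate(pos, mismatches, current_kmer):
--         if mismatches > m:  # Stop if we exceed the allowed mismatches
--             return
--         if pos == n:  # If we processed all positions, add the modified k-mer
--             mismatch_neighbors.add("".join(current_kmer))
--             return
--
--         # Keep the original character (no mismatch at this position)
--         generate(pos + 1, mismatches, current_kmer)
--
--         # Try all possible mismatches at the current position
--         original_char = current_kmer[pos]
--         for char in alphabet:
--             if char != original_char:  # Only substitute if it's different
--                 current_kmer[pos] = char
--                 generate(pos + 1, mismatches + 1, current_kmer)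
--                 current_kmer[pos] = original_char  # Restore original
--
--     generate(0, 0, list(kmer))
--     return mismatch_neighbors
--
-- def compute_feature_vector(seq, k, m, alphabet, neighbor_cache):
--     """
--     Compute the feature vector for a given sequence using the mismatch kernel.
--
--     Args:
--         seq (str): Input DNA sequence.
--         k (int): Length of k-mers.
--         m (int): Maximum number of mismatches allowed.
--         alphabet (str): Alphabet set (e.g., "ACGT").
--         neighbor_cache (dict): Dictionary to cache computed mismatch neighborhoods.
--
--     Returns:
--         dict: Feature vector where keys are k-mers and values are their frequencies.
--     """
--     feature_vector = defaultdict(int)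
--
--     # Iterate over all k-mers in the sequence
--     for i in range(len(seq) - k + 1):
--         kmer = seq[i : i + k]  # Extract k-mer from the sequence
--
--         # Check if neighbors are cached
--         if kmer in neighbor_cache:
--             neighbors = neighbor_cache[kmer]
--         else:
--             neighbors = generate_mismatch_neighbors(kmer, m, alphabet)
--             neighbor_cache[kmer] = neighbors  # Cache the result
--
--         # Update feature vector for all mismatch neighbors
--         for neighbor in neighbors:
--             feature_vector[neighbor] += 1  # Count occurrences
--
--     return feature_vector
-- ===== SOURCE B (Python) =====
-- from collections import Counter, defaultdict
--
--
-- def _neighbor_set(kmer, m, alphabet):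
--     # All strings within <= m mismatches of kmer, built iteratively:
--     # expand position by position, tracking the mismatch count per partial string.
--     if m < 0:
--         return set()
--     states = [("", 0)]
--     for ch in kmer:
--         new_states = []
--         for prefix, d in states:
--             for c in [ch] + [x for x in alphabet if x != ch]:
--                 d2 = d + (1 if c != ch else 0)
--                 if d2 <= m:
--                     new_states.append((prefix + c, d2))
--         states = new_states
--     neighbors = set()
--     for s, _ in states:
--         neighbors.add(s)
--     return neighbors
--
--
-- def compute_feature_vector(seq, k, m, alphabet, neighbor_cache):
--     all_neighbors = []
--     for i in range(len(seq) - k + 1):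
--         kmer = seq[i : i + k]
--         if kmer not in neighbor_cache:
--             neighbor_cache[kmer] = _neighbor_set(kmer, m, alphabet)
--         all_neighbors.extend(neighbor_cache[kmer])
--     return defaultdict(int, Counter(all_neighbors))
-- ===== Notes on version B (the rewrite author's own statement) =====
-- stated objective: alternative
-- what changed: Neighbor generation is an iterative position-by-position product expansion over (prefix, mismatch-count) states collected into a set, instead of A's recursive backtracking DFS over a mutated char list; and the feature vector is built by flattening all windows' neighbor collections and counting once with collections.Counter, instead of incrementing a defaultdict entry by entry inside the window loop.
import Mathlib
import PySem

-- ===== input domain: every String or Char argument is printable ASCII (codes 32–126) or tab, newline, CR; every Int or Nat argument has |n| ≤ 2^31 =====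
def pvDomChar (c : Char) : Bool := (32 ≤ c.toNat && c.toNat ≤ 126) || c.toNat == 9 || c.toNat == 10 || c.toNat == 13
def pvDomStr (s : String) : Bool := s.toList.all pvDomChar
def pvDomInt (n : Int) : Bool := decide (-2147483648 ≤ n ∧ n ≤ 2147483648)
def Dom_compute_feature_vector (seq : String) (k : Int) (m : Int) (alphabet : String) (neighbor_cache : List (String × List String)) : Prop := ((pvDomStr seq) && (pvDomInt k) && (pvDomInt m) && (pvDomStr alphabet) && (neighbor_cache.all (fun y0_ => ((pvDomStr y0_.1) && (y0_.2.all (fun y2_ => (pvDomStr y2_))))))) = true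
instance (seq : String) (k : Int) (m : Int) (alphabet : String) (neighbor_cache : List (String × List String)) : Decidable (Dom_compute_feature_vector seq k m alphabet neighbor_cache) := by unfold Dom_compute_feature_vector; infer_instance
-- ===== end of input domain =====

-- B replaces A's recursive-backtracking neighbor DFS by an iterative per-position product
-- expansion into a set and counts a flattened neighbor list once with Counter (objective:
-- alternative). Both Pythons mutate neighbor_cache (each caches the neighbor sets it
-- computed); the theorems are about the RETURN value only.

-- ===== PORT A =====
-- A's inner 'generate(pos, mismatches, current_kmer)'; the Python mutates current_kmer[pos]
-- and restores it — here the updated list 'cur.set pos c' is passed down instead (exact, since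
-- the Python restores the character right after the recursive call returns).
-- 'pos == n' is written 'cur.length ≤ pos' (equal on every reachable call, where pos ≤ n) so
-- that the recursion is structurally decreasing.
def generate_mismatch_go (m : Int) (alphabet : List Char) (cur : List Char) (pos : Nat) (mismatches : Int) (acc : PySem.Set String) : PySem.Set String :=
  if mismatches > m then acc
  else if h : cur.length ≤ pos then PySem.Set.add acc (String.ofList cur)
  else
    let acc1 := generate_mismatch_go m alphabet cur (pos + 1) mismatches acc
    let orig := cur.getD pos ' '
    alphabet.foldl
      (fun a c =>
        if c ≠ orig then generate_mismatch_go m alphabet (cur.set pos c) (pos + 1) (mismatches + 1) a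
        else a)
      acc1
termination_by cur.length - pos
decreasing_by all_goals simp_all [List.length_set]; omega

def generate_mismatch_neighbors (kmer : String) (m : Int) (alphabet : String) : List String :=
  if m == 0 then PySem.Set.add PySem.Set.empty kmer
  else generate_mismatch_go m alphabet.toList kmer.toList 0 0 PySem.Set.empty

def cfv_step (seq : String) (k : Int) (m : Int) (alphabet : String)
    (st : PySem.Dict String (List String) × PySem.Dict String Int) (i : Int) :
    PySem.Dict String (List String) × PySem.Dict String Int :=
  let kmer := PySem.Str.slice seq (some i) (some (i + k))
  if st.1.contains kmer then
    (st.1, (st.1.getD kmer []).foldl (fun d nb => d.modify nb 0 (· + 1)) st.2)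
  else
    let ns := generate_mismatch_neighbors kmer m alphabet
    (st.1.insert kmer ns, ns.foldl (fun d nb => d.modify nb 0 (· + 1)) st.2)

def compute_feature_vector (seq : String) (k : Int) (m : Int) (alphabet : String) (neighbor_cache : List (String × List String)) : List (String × Int) :=
  ((PySem.List.pyRange 0 (PySem.Str.len seq - k + 1) 1).foldl (cfv_step seq k m alphabet)
      (PySem.Dict.ofList neighbor_cache, (PySem.Dict.empty : PySem.Dict String Int))).2.items

-- ===== PORT B =====
-- 'new_states' inner double loop of _neighbor_list
def nb_step (m : Int) (alphabet : List Char) (states : List (List Char × Int)) (ch : Char) :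
    List (List Char × Int) :=
  states.flatMap (fun pd =>
    (ch :: alphabet.filter (fun x => x ≠ ch)).filterMap (fun c =>
      let d2 := pd.2 + (if c ≠ ch then (1 : Int) else 0)
      if d2 ≤ m then some (pd.1 ++ [c], d2) else none))

def neighbor_list (kmer : String) (m : Int) (alphabet : String) : List String :=
  if m < 0 then []
  else
    PySem.Set.ofList
      ((kmer.toList.foldl (nb_step m alphabet.toList) [(([] : List Char), (0 : Int))]).map
        (fun pd => String.ofList pd.1))

def cfv_alt_step (seq : String) (k : Int) (m : Int) (alphabet : String)
    (st : PySem.Dict String (List String) × List String) (i : Int) :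
    PySem.Dict String (List String) × List String :=
  let kmer := PySem.Str.slice seq (some i) (some (i + k))
  let cache := if st.1.contains kmer then st.1 else st.1.insert kmer (neighbor_list kmer m alphabet)
  (cache, st.2 ++ cache.getD kmer [])

def compute_feature_vector_alt (seq : String) (k : Int) (m : Int) (alphabet : String) (neighbor_cache : List (String × List String)) : List (String × Int) :=
  (PySem.Dict.counter
      (((PySem.List.pyRange 0 (PySem.Str.len seq - k + 1) 1).foldl (cfv_alt_step seq k m alphabet)
          (PySem.Dict.ofList neighbor_cache, ([] : List String))).2)).items

-- ===== PRECONDITION & SPEC =====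
def Spec_compute_feature_vector (seq : String) (k : Int) (m : Int) (alphabet : String) (neighbor_cache : List (String × List String)) (out : List (String × Int)) : Prop := out = compute_feature_vector_alt seq k m alphabet neighbor_cache
instance (seq : String) (k : Int) (m : Int) (alphabet : String) (neighbor_cache : List (String × List String)) (out : List (String × Int)) : Decidable (Spec_compute_feature_vector seq k m alphabet neighbor_cache out) := by unfold Spec_compute_feature_vector; infer_instance

-- ===== CLAIM (what is proved, stated in full; the proofs are below) =====
def Claim_equal_compute_feature_vector : Prop := ∀ (seq : String) (k : Int) (m : Int) (alphabet : String) (neighbor_cache : List (String × List String)), Dom_compute_feature_vector seq k m alphabet neighbor_cache → Spec_compute_feature_vector seq k m alphabet neighbor_cache (compute_feature_vector seq k m alphabet neighbor_cache)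

-- ===== LEMMAS AND PROOFS =====

-- The DFS leaf list: all suffixes within the remaining mismatch budget, in A's emission order
-- (keep the original character first, then each substituting character of the alphabet).
def Lnb (m : Int) (alphabet : List Char) : Int → List Char → List (List Char)
  | d, [] => if d > m then [] else [[]]
  | d, ch :: rest =>
      if d > m then []
      else
        (Lnb m alphabet d rest).map (ch :: ·) ++
          (alphabet.filter (fun x => x ≠ ch)).flatMap (fun c => (Lnb m alphabet (d + 1) rest).map (c :: ·))

theorem Lnb_of_gt (m : Int) (alphabet : List Char) (d : Int) (chars : List Char) (h : m < d) :
    Lnb m alphabet d chars = [] := by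
  cases chars <;> simp [Lnb, h]

theorem Lnb_eq_self (m : Int) (alphabet : List Char) (chars : List Char) :
    Lnb m alphabet m chars = [chars] := by
  induction chars with
  | nil => simp [Lnb]
  | cons ch rest ih => simp [Lnb, ih, Lnb_of_gt m alphabet (m + 1) rest (by omega)]

theorem foldl_set_update {α : Type} [BEq α] [LawfulBEq α] (g : Char → List α) :
    ∀ (l : List Char) (acc : PySem.Set α),
      l.foldl (fun a c => PySem.Set.update a (g c)) acc = PySem.Set.update acc (l.flatMap g) := by
  intro l
  induction l with
  | nil => intro acc; simp [PySem.Set.update_nil]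
  | cons c t ih => intro acc; simp [List.foldl_cons, ih, PySem.Set.update_append]

theorem take_set_succ (l : List Char) (n : Nat) (c : Char) (h : n < l.length) :
    (l.set n c).take (n + 1) = l.take n ++ [c] := by
  rw [List.take_add_one]
  simp [List.take_set, h, List.set_eq_of_length_le (by simp : (List.take n l).length ≤ n)]

theorem take_succ_getElem (l : List Char) (n : Nat) (h : n < l.length) :
    l.take (n + 1) = l.take n ++ [l[n]] := by
  rw [List.take_add_one]
  simp [List.getElem?_eq_getElem h]

-- A's DFS characterized by Lnb
theorem genA_char (m : Int) (alphabet : List Char) :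
    ∀ (N : Nat) (cur : List Char) (pos : Nat), cur.length - pos = N → pos ≤ cur.length →
      ∀ (mism : Int) (acc : PySem.Set String),
        generate_mismatch_go m alphabet cur pos mism acc
          = PySem.Set.update acc
              ((Lnb m alphabet mism (cur.drop pos)).map (fun s => String.ofList (cur.take pos ++ s))) := by
  intro N
  induction N with
  | zero =>
      intro cur pos hN hle mism acc
      have hpos : pos = cur.length := by omega
      subst hpos
      rw [generate_mismatch_go]
      by_cases hm : mism > m
      · simp [hm, Lnb_of_gt m alphabet mism _ hm, PySem.Set.update_nil]
      · simp [hm, Lnb, PySem.Set.update_cons, PySem.Set.update_nil]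
  | succ N ih =>
      intro cur pos hN hle mism acc
      have hpos : pos < cur.length := by omega
      rw [generate_mismatch_go]
      by_cases hm : mism > m
      · simp [hm, Lnb_of_gt m alphabet mism _ hm, PySem.Set.update_nil]
      · have hnot : ¬ cur.length ≤ pos := by omega
        simp only [if_neg hm, dif_neg hnot]
        have horig : cur.getD pos ' ' = cur[pos] := List.getD_eq_getElem cur ' ' hpos
        rw [horig, ih cur (pos + 1) (by omega) (by omega) mism acc]
        have hcong : ∀ (a : PySem.Set String) (c : Char), c ∈ alphabet →
            (if c ≠ cur[pos] then
                generate_mismatch_go m alphabet (cur.set pos c) (pos + 1) (mism + 1) a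
             else a)
            = (if c ≠ cur[pos] then
                PySem.Set.update a ((Lnb m alphabet (mism + 1) (cur.drop (pos + 1))).map
                  (fun s => String.ofList (cur.take pos ++ c :: s)))
               else a) := by
          intro a c _
          by_cases hc : c ≠ cur[pos]
          · rw [if_pos hc, if_pos hc,
              ih (cur.set pos c) (pos + 1) (by simp [List.length_set]; omega)
                (by simp [List.length_set]; omega) (mism + 1) a]
            have hd : (cur.set pos c).drop (pos + 1) = cur.drop (pos + 1) := by
              simp [List.drop_set]
            have ht : (cur.set pos c).take (pos + 1) = cur.take pos ++ [c] :=
              take_set_succ cur pos c hpos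
            rw [hd, ht]
            simp
          · rw [if_neg hc, if_neg hc]
        rw [PySem.List.foldl_congr_mem alphabet _ _ _ hcong,
          PySem.List.foldl_ite_eq_foldl_filter, foldl_set_update]
        rw [List.drop_eq_getElem_cons hpos]
        have hLnb : Lnb m alphabet mism (cur[pos] :: cur.drop (pos + 1))
            = (Lnb m alphabet mism (cur.drop (pos + 1))).map (cur[pos] :: ·) ++
                (alphabet.filter (fun x => x ≠ cur[pos])).flatMap
                  (fun c => (Lnb m alphabet (mism + 1) (cur.drop (pos + 1))).map (c :: ·)) := by
          rw [Lnb, if_neg hm]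
        rw [hLnb, List.map_append, PySem.Set.update_append]
        congr 1
        · congr 1
          rw [List.map_map]
          apply List.map_congr_left
          intro s _
          rw [take_succ_getElem cur pos hpos, List.append_assoc]
          rfl
        · rw [List.map_flatMap]
          apply List.flatMap_congr
          intro c _
          rw [List.map_map]
          rfl

theorem filterMap_toList {α β : Type} (f : α → Option β) (l : List α) :
    l.filterMap f = l.flatMap (fun a => (f a).toList) := by
  induction l with
  | nil => rfl
  | cons a t ih => cases h : f a <;> simp [h, ih]

-- B's iterative expansion characterized by Lnb
theorem Bexp (m : Int) (alphabet : List Char) :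
    ∀ (chars : List Char) (states : List (List Char × Int)),
      (∀ pd ∈ states, pd.2 ≤ m) →
      (chars.foldl (nb_step m alphabet) states).map (·.1)
        = states.flatMap (fun pd => (Lnb m alphabet pd.2 chars).map (fun s => pd.1 ++ s)) := by
  intro chars
  induction chars with
  | nil =>
      intro states hinv
      simp only [List.foldl_nil]
      induction states with
      | nil => simp
      | cons pd t ihs =>
          have h1 : pd.2 ≤ m := hinv pd (by simp)
          rw [List.map_cons, List.flatMap_cons, ihs (fun q hq => hinv q (by simp [hq]))]
          have hl : Lnb m alphabet pd.2 [] = [[]] := by rw [Lnb, if_neg (by omega)]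
          simp [hl]
  | cons ch rest ih =>
      intro states hinv
      rw [List.foldl_cons,
        ih (nb_step m alphabet states ch) (by
          intro pd hpd
          simp only [nb_step, List.mem_flatMap, List.mem_filterMap] at hpd
          obtain ⟨q, _, c, _, hsome⟩ := hpd
          by_cases hcd : q.2 + (if c ≠ ch then (1 : Int) else 0) ≤ m
          · rw [if_pos hcd] at hsome
            injection hsome with h2
            rw [← h2]
            exact hcd
          · rw [if_neg hcd] at hsome
            cases hsome)]
      simp only [nb_step, List.flatMap_assoc]
      apply List.flatMap_congr
      intro pd hpd
      have hd : pd.2 ≤ m := hinv pd hpd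
      have hgt : ¬ pd.2 > m := by omega
      rw [List.filterMap_cons]
      have hch : (if pd.2 + (if ch ≠ ch then (1 : Int) else 0) ≤ m
            then some (pd.1 ++ [ch], pd.2 + (if ch ≠ ch then (1 : Int) else 0)) else none)
          = some (pd.1 ++ [ch], pd.2) := by
        simp [hd]
      simp only [hch]
      rw [List.flatMap_cons, Lnb, if_neg hgt, List.map_append]
      congr 1
      · rw [List.map_map]
        apply List.map_congr_left
        intro s _
        simp
      · rw [filterMap_toList, List.flatMap_assoc, List.map_flatMap]
        apply List.flatMap_congr
        intro c hc
        have hcne : c ≠ ch := by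
          simp only [List.mem_filter, decide_eq_true_eq] at hc
          exact hc.2
        simp only [if_pos hcne]
        by_cases hbud : pd.2 + 1 ≤ m
        · rw [if_pos hbud]
          simp only [Option.toList_some, List.flatMap_cons, List.flatMap_nil, List.append_nil,
            List.map_map]
          apply List.map_congr_left
          intro s _
          simp
        · rw [if_neg hbud, Lnb_of_gt m alphabet (pd.2 + 1) rest (by omega)]
          simp

-- the two neighbor generators agree
theorem gen_eq (kmer : String) (m : Int) (alphabet : String) :
    generate_mismatch_neighbors kmer m alphabet = neighbor_list kmer m alphabet := by
  by_cases hneg : m < 0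
  · rw [generate_mismatch_neighbors, neighbor_list, if_pos hneg,
      if_neg (by simp; omega), generate_mismatch_go, if_pos (by omega : (0 : Int) > m)]
    rfl
  · have hB : neighbor_list kmer m alphabet
        = PySem.Set.ofList ((Lnb m alphabet.toList 0 kmer.toList).map String.ofList) := by
      rw [neighbor_list, if_neg hneg]
      have hexp := Bexp m alphabet.toList kmer.toList [(([] : List Char), (0 : Int))]
        (by intro pd hpd; simp at hpd; rw [hpd]; omega)
      rw [show (fun (pd : List Char × Int) => String.ofList pd.1)
            = String.ofList ∘ (fun (pd : List Char × Int) => pd.1) from rfl,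
        ← List.map_map, hexp]
      simp
    by_cases h0 : m = 0
    · subst h0
      rw [generate_mismatch_neighbors, if_pos (by simp), hB, Lnb_eq_self]
      simp [PySem.Set.add, PySem.Set.empty, PySem.Set.ofList]
    · rw [generate_mismatch_neighbors, if_neg (by simp [h0]), hB,
        genA_char m alphabet.toList kmer.toList.length kmer.toList 0 (by omega) (by omega) 0
          PySem.Set.empty]
      rw [show (PySem.Set.empty : PySem.Set String) = ([] : List String) from rfl,
        PySem.Set.update_nil_left]
      simp

theorem Bsuffix (seq : String) (k : Int) (m : Int) (alphabet : String) :
    ∀ (l : List Int) (cache : PySem.Dict String (List String)) (all : List String),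
      l.foldl (cfv_alt_step seq k m alphabet) (cache, all)
        = ((l.foldl (cfv_alt_step seq k m alphabet) (cache, [])).1,
            all ++ (l.foldl (cfv_alt_step seq k m alphabet) (cache, [])).2) := by
  intro l
  induction l with
  | nil => intro cache all; simp
  | cons i t ih =>
      intro cache all
      simp only [List.foldl_cons]
      rw [show cfv_alt_step seq k m alphabet (cache, all) i
            = ((cfv_alt_step seq k m alphabet (cache, []) i).1,
               all ++ (cfv_alt_step seq k m alphabet (cache, []) i).2) from by
            simp [cfv_alt_step]]
      rw [ih, ih (cfv_alt_step seq k m alphabet (cache, []) i).1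
            (cfv_alt_step seq k m alphabet (cache, []) i).2]
      simp

theorem AB (seq : String) (k : Int) (m : Int) (alphabet : String) :
    ∀ (l : List Int) (cache : PySem.Dict String (List String)) (fv : PySem.Dict String Int),
      l.foldl (cfv_step seq k m alphabet) (cache, fv)
        = ((l.foldl (cfv_alt_step seq k m alphabet) (cache, [])).1,
            ((l.foldl (cfv_alt_step seq k m alphabet) (cache, [])).2).foldl
              (fun d nb => d.modify nb 0 (· + 1)) fv) := by
  intro l
  induction l with
  | nil => intro cache fv; simp
  | cons i t ih =>
      intro cache fv
      simp only [List.foldl_cons]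
      by_cases hc : cache.contains (PySem.Str.slice seq (some i) (some (i + k))) = true
      · have hA : cfv_step seq k m alphabet (cache, fv) i
            = (cache, (cache.getD (PySem.Str.slice seq (some i) (some (i + k))) []).foldl
                (fun d nb => d.modify nb 0 (· + 1)) fv) := by
          simp [cfv_step, hc]
        have hB : cfv_alt_step seq k m alphabet (cache, []) i
            = (cache, cache.getD (PySem.Str.slice seq (some i) (some (i + k))) []) := by
          simp [cfv_alt_step, hc]
        rw [hA, hB, ih, Bsuffix seq k m alphabet t cache
              (cache.getD (PySem.Str.slice seq (some i) (some (i + k))) [])]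
        simp [List.foldl_append]
      · have hgen := gen_eq (PySem.Str.slice seq (some i) (some (i + k))) m alphabet
        have hA : cfv_step seq k m alphabet (cache, fv) i
            = (cache.insert (PySem.Str.slice seq (some i) (some (i + k)))
                 (neighbor_list (PySem.Str.slice seq (some i) (some (i + k))) m alphabet),
               (neighbor_list (PySem.Str.slice seq (some i) (some (i + k))) m alphabet).foldl
                 (fun d nb => d.modify nb 0 (· + 1)) fv) := by
          simp [cfv_step, hc, hgen]
        have hB : cfv_alt_step seq k m alphabet (cache, []) i
            = (cache.insert (PySem.Str.slice seq (some i) (some (i + k)))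
                 (neighbor_list (PySem.Str.slice seq (some i) (some (i + k))) m alphabet),
               neighbor_list (PySem.Str.slice seq (some i) (some (i + k))) m alphabet) := by
          simp [cfv_alt_step, hc, PySem.Dict.getD_insert_self]
        rw [hA, hB, ih, Bsuffix seq k m alphabet t
              (cache.insert (PySem.Str.slice seq (some i) (some (i + k)))
                (neighbor_list (PySem.Str.slice seq (some i) (some (i + k))) m alphabet))
              (neighbor_list (PySem.Str.slice seq (some i) (some (i + k))) m alphabet)]
        simp [List.foldl_append]

-- ===== VERDICT (by name: the statement is the Claim_ definition above) =====
theorem compute_feature_vector_spec : Claim_equal_compute_feature_vector := by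
  intro seq k m alphabet neighbor_cache _
  unfold Spec_compute_feature_vector compute_feature_vector compute_feature_vector_alt
  rw [AB seq k m alphabet]
  rfl
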